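-- pv_equiv track=rewrite | github.com/PLSE-Lab/Python-MLAPI-expl | python_sources/google-q-a-labeling-bert.py | _get_segments
-- ===== SOURCE A (Python) =====
-- def _get_segments(tokens, max_seq_length):
--     """Segments: 0 for the first sequence, 1 for the second"""
--     if len(tokens)>max_seq_length:
--         raise IndexError("Token length more than max seq length!")
--     segments = []
--     first_sep = True
--     current_segment_id = 0
--     for token in tokens:
--         segments.append(current_segment_id)
--         if token == "[SEP]":
--             if first_sep:
--                 first_sep = False
--             else:
--                 current_segment_id = 1
--     return segments + [0] * (max_seq_length - len(tokens))
-- ===== SOURCE B (Python) =====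
-- def _get_segments(tokens, max_seq_length):
--     """Segments: 0 for the first sequence, 1 for the second"""
--     if len(tokens) > max_seq_length:
--         raise IndexError("Token length more than max seq length!")
--     sep_positions = [i for i, t in enumerate(tokens) if t == "[SEP]"]
--     if len(sep_positions) >= 2:
--         b = sep_positions[1]
--         segments = [0] * (b + 1) + [1] * (len(tokens) - b - 1)
--     else:
--         segments = [0] * len(tokens)
--     return segments + [0] * (max_seq_length - len(tokens))
-- ===== Notes on version B (the rewrite author's own statement) =====
-- stated objective: alternative
-- what changed: Replaces the per-token running-flag scan with locating the second [SEP] index once (enumerate comprehension) and building the result from three constant blocks.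
import Mathlib
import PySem

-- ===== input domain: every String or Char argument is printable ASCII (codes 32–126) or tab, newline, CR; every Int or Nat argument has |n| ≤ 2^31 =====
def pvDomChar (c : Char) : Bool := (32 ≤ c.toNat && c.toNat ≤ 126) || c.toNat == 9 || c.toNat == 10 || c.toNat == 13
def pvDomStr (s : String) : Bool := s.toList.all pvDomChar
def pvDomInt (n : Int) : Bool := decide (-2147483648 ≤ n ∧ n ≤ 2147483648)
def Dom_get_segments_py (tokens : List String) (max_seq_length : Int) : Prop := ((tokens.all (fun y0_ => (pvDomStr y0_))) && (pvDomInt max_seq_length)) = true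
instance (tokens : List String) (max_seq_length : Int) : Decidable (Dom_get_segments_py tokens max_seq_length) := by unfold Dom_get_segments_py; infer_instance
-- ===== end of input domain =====

-- B replaces A's per-token running-flag scan by locating the second "[SEP]" index once and
-- concatenating constant blocks (alternative decomposition, same asymptotic cost).


-- ===== PORT A =====
-- loop state = (segments, first_sep, current_segment_id); the len>max IndexError is excluded by Pre_
def aStep (st : List Int × Bool × Int) (token : String) : List Int × Bool × Int :=
  let segments := st.1 ++ [st.2.2]
  if token == "[SEP]" then
    if st.2.1 then (segments, false, st.2.2) else (segments, st.2.1, 1)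
  else (segments, st.2.1, st.2.2)

def get_segments_py (tokens : List String) (max_seq_length : Int) : List Int :=
  let st := tokens.foldl aStep ([], true, 0)
  st.1 ++ List.replicate (max_seq_length - tokens.length).toNat 0

-- ===== PORT B =====
def get_segments_py_alt (tokens : List String) (max_seq_length : Int) : List Int :=
  let sep_positions := ((PySem.List.enumerate tokens).filter (fun p => p.2 == "[SEP]")).map (fun p => p.1)
  let segments :=
    match sep_positions with
    | _ :: b :: _ =>
        List.replicate (b + 1).toNat (0 : Int) ++
          List.replicate ((tokens.length : Int) - b - 1).toNat (1 : Int)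
    | _ => List.replicate tokens.length (0 : Int)
  segments ++ List.replicate (max_seq_length - tokens.length).toNat 0

-- ===== PRECONDITION & SPEC =====
-- Pre_ excludes exactly the inputs where A raises IndexError ("Token length more than max seq length!")
def Pre_get_segments_py (tokens : List String) (max_seq_length : Int) : Prop :=
  (tokens.length : Int) ≤ max_seq_length
instance (tokens : List String) (max_seq_length : Int) : Decidable (Pre_get_segments_py tokens max_seq_length) := by unfold Pre_get_segments_py; infer_instance
def pvWitness_get_segments_py : List String × Int := (["[CLS]", "hi", "[SEP]", "yo", "[SEP]"], 7)

def Spec_get_segments_py (tokens : List String) (max_seq_length : Int) (out : List Int) : Prop := out = get_segments_py_alt tokens max_seq_length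
instance (tokens : List String) (max_seq_length : Int) (out : List Int) : Decidable (Spec_get_segments_py tokens max_seq_length out) := by unfold Spec_get_segments_py; infer_instance

-- ===== CLAIM (what is proved, stated in full; the proofs are below) =====
def Claim_equal_get_segments_py : Prop := ∀ (tokens : List String) (max_seq_length : Int), Dom_get_segments_py tokens max_seq_length → Pre_get_segments_py tokens max_seq_length → Spec_get_segments_py tokens max_seq_length (get_segments_py tokens max_seq_length)

-- ===== LEMMAS AND PROOFS =====

-- the segment list A's loop produces, acc-free
def segGo : List String → Bool → Int → List Int
  | [], _, _ => []
  | t :: ts, fs, cid =>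
      cid :: (if t == "[SEP]" then (if fs then segGo ts false cid else segGo ts fs 1)
              else segGo ts fs cid)

-- the list of [SEP] indices, structurally
def sepsI : List String → List Int
  | [] => []
  | t :: ts => if t == "[SEP]" then 0 :: (sepsI ts).map (· + 1) else (sepsI ts).map (· + 1)

-- block form keyed on the FIRST element of a sep-index list
def blocks (n : Int) : List Int → List Int
  | b :: _ => List.replicate (b + 1).toNat (0 : Int) ++ List.replicate (n - b - 1).toNat (1 : Int)
  | [] => List.replicate n.toNat (0 : Int)

-- block form keyed on the SECOND element of a sep-index list
def blocks2 (n : Int) : List Int → List Int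
  | _ :: b :: _ => List.replicate (b + 1).toNat (0 : Int) ++ List.replicate (n - b - 1).toNat (1 : Int)
  | _ => List.replicate n.toNat (0 : Int)

theorem sepsI_nonneg : ∀ (ts : List String), ∀ x ∈ sepsI ts, 0 ≤ x := by
  intro ts
  induction ts with
  | nil => simp [sepsI]
  | cons t ts ih =>
      simp only [sepsI]
      split <;> simp_all <;> intro x hx <;> have := ih x hx <;> omega

theorem seps_eq_enum (ts : List String) :
    ∀ s : Int, ((PySem.List.enumerate ts s).filter (fun p => p.2 == "[SEP]")).map (fun p => p.1)
      = (sepsI ts).map (· + s) := by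
  induction ts with
  | nil => intro s; simp [PySem.List.enumerate_nil, sepsI]
  | cons t ts ih =>
      intro s
      simp only [PySem.List.enumerate_cons, sepsI, List.filter_cons]
      by_cases h : t = "[SEP]"
      · simp [h, ih (s + 1)]
        intro a _; omega
      · simp [h, ih (s + 1)]
        intro a _; omega

theorem foldl_seg (ts : List String) :
    ∀ (acc : List Int) (fs : Bool) (cid : Int),
      (ts.foldl aStep (acc, fs, cid)).1 = acc ++ segGo ts fs cid := by
  induction ts with
  | nil => intro acc fs cid; simp [segGo]
  | cons t ts ih =>
      intro acc fs cid
      rw [List.foldl_cons]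
      by_cases h : t = "[SEP]"
      · cases fs
        · have hstep : aStep (acc, false, cid) t = (acc ++ [cid], false, 1) := by simp [aStep, h]
          rw [hstep, ih]; simp [segGo, h]
        · have hstep : aStep (acc, true, cid) t = (acc ++ [cid], false, cid) := by simp [aStep, h]
          rw [hstep, ih]; simp [segGo, h]
      · have hstep : aStep (acc, fs, cid) t = (acc ++ [cid], fs, cid) := by simp [aStep, h]
        rw [hstep, ih]; simp [segGo, h]

theorem segGo_one (ts : List String) : ∀ fs, segGo ts fs 1 = List.replicate ts.length (1 : Int) := by
  induction ts with
  | nil => intro fs; simp [segGo]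
  | cons t ts ih =>
      intro fs
      simp only [segGo, List.length_cons, List.replicate_succ]
      split
      · cases fs <;> simp [ih]
      · simp [ih]

theorem segGo_false0 (ts : List String) :
    segGo ts false 0 = blocks (ts.length : Int) (sepsI ts) := by
  induction ts with
  | nil => simp [segGo, sepsI, blocks]
  | cons t ts ih =>
      by_cases h : t = "[SEP]"
      · subst h
        simp only [segGo, sepsI, if_pos (by rfl : (("[SEP]" : String) == "[SEP]") = true),
          segGo_one, blocks, List.length_cons, Nat.cast_add, Nat.cast_one]
        have h2 : ((ts.length : Int) + 1 - 0 - 1).toNat = ts.length := by omega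
        rw [h2]
        simp [List.replicate_succ]
      · have hb : ((t : String) == "[SEP]") = false := by simp [h]
        simp only [segGo, sepsI, hb, Bool.false_eq_true, if_false, ih, List.length_cons, Nat.cast_add,
          Nat.cast_one]
        cases hs : sepsI ts with
        | nil => simp [blocks, List.replicate_succ]
        | cons b rest =>
            have hb0 : 0 ≤ b := sepsI_nonneg ts b (by simp [hs])
            simp only [List.map_cons, blocks]
            have h1 : (b + 1 + 1).toNat = (b + 1).toNat + 1 := by omega
            have h2 : ((ts.length : Int) + 1 - (b + 1) - 1).toNat = ((ts.length : Int) - b - 1).toNat := by omega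
            rw [h1, h2, List.replicate_succ]
            simp

theorem segGo_true0 (ts : List String) :
    segGo ts true 0 = blocks2 (ts.length : Int) (sepsI ts) := by
  induction ts with
  | nil => simp [segGo, sepsI, blocks2]
  | cons t ts ih =>
      by_cases h : t = "[SEP]"
      · subst h
        simp only [segGo, sepsI, if_pos (by rfl : (("[SEP]" : String) == "[SEP]") = true),
          segGo_false0, List.length_cons, Nat.cast_add, Nat.cast_one]
        cases hs : sepsI ts with
        | nil => simp [blocks, blocks2, List.replicate_succ]
        | cons b rest =>
            have hb0 : 0 ≤ b := sepsI_nonneg ts b (by simp [hs])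
            simp only [List.map_cons, blocks, blocks2]
            have h1 : (b + 1 + 1).toNat = (b + 1).toNat + 1 := by omega
            have h2 : ((ts.length : Int) + 1 - (b + 1) - 1).toNat = ((ts.length : Int) - b - 1).toNat := by omega
            rw [h1, h2, List.replicate_succ]
            simp
      · have hb : ((t : String) == "[SEP]") = false := by simp [h]
        simp only [segGo, sepsI, hb, Bool.false_eq_true, if_false, ih, List.length_cons, Nat.cast_add,
          Nat.cast_one]
        cases hs : sepsI ts with
        | nil => simp [blocks2, List.replicate_succ]
        | cons b rest =>
            cases rest with
            | nil => simp [blocks2, List.replicate_succ]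
            | cons c rest' =>
                have hc0 : 0 ≤ c := sepsI_nonneg ts c (by simp [hs])
                simp only [List.map_cons, blocks2]
                have h1 : (c + 1 + 1).toNat = (c + 1).toNat + 1 := by omega
                have h2 : ((ts.length : Int) + 1 - (c + 1) - 1).toNat = ((ts.length : Int) - c - 1).toNat := by omega
                rw [h1, h2, List.replicate_succ]
                simp

-- B's match over the sep-position list equals blocks2
theorem alt_match_eq_blocks2 (n : Nat) (l : List Int) :
    (match l with
      | _ :: b :: _ =>
          List.replicate (b + 1).toNat (0 : Int) ++ List.replicate ((n : Int) - b - 1).toNat (1 : Int)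
      | _ => List.replicate n (0 : Int)) = blocks2 (n : Int) l := by
  match l with
  | [] => simp [blocks2]
  | [b] => simp [blocks2]
  | a :: b :: rest => simp [blocks2]

-- ===== VERDICT (by name: the statement is the Claim_ definition above) =====
theorem get_segments_py_spec : Claim_equal_get_segments_py := by
  intro tokens max_seq_length _ _
  unfold Spec_get_segments_py get_segments_py get_segments_py_alt
  have hseps := seps_eq_enum tokens 0
  simp only [foldl_seg, List.nil_append, segGo_true0, hseps]
  have hid : (sepsI tokens).map (· + 0) = sepsI tokens := by simp
  rw [hid, alt_match_eq_blocks2]
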